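-- pv_equiv track=rewrite | github.com/JoeMazich/CosmicRay | CosmicRate.py | ExtractL0rates
-- ===== SOURCE A (Python) =====
-- def ExtractL0rates(dict, time_table):
--     # these are the ULTIMATE arrays, only small tweaks will be needed later on to have the animation function read them properly
--     detectors_placements, detectors_rates = [], []
--     # these are temp arrays that are created to get the information for a frame, then are appeneded to the ULITMATE arrays above
--     frame_detectors_placements, frame_detectors_rates = [], []
--     # if a cutoff is needed for time, to look at a more specifc window, it can be done here
--     # (Or in the Time_Table function but its best to leave that as is and do it here)
--     for table_time in time_table:
--         for time_det, lv0_ccoors_rate in dict.items():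
--             # this is totally overboard for what is needed for this function (we only need this_time (to check), this_ccoors (for placement), and this_rate (for the colors))
--             # butthis serves as a good example of how this dict setup can be use if it is desired to be used differently later
--             this_time = time_det[0]
--             this_det = time_det[1]
--             this_lv0 = lv0_ccoors_rate[0]
--             this_ccoor = lv0_ccoors_rate[1]
--             this_rate = lv0_ccoors_rate[2]
--             # grab all the info for each time, making each time a frame
--             if this_time == table_time:
--                 frame_detectors_placements.append(this_ccoor)
--                 frame_detectors_rates.append(this_rate)
--         # append each frame to the ulitmate arrays
--         detectors_placements.append(frame_detectors_placements)
--         detectors_rates.append(frame_detectors_rates)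
--         # reset the frames
--         frame_detectors_placements, frame_detectors_rates = [], []
--
--     return detectors_placements, detectors_rates
-- ===== SOURCE B (Python) =====
-- def ExtractL0rates(dict, time_table):
--     # No frames requested: nothing to do, skip building the index.
--     if not time_table:
--         return [], []
--     # One pass over the dict: bucket (ccoor, rate) by time; then one lookup per table_time.
--     buckets = {}
--     for time_det, lv0_ccoors_rate in dict.items():
--         b = buckets.setdefault(time_det[0], ([], []))
--         b[0].append(lv0_ccoors_rate[1])
--         b[1].append(lv0_ccoors_rate[2])
--     empty = ([], [])
--     detectors_placements = [list(buckets.get(t, empty)[0]) for t in time_table]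
--     detectors_rates = [list(buckets.get(t, empty)[1]) for t in time_table]
--     return detectors_placements, detectors_rates
-- ===== Notes on version B (the rewrite author's own statement) =====
-- stated objective: faster
-- what changed: B replaces A's nested rescan of the whole dict for every table_time by a single pass that buckets (ccoor, rate) pairs by time into a dict, then does one O(1) lookup per table_time (returning immediately when no times are requested).
import Mathlib
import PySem

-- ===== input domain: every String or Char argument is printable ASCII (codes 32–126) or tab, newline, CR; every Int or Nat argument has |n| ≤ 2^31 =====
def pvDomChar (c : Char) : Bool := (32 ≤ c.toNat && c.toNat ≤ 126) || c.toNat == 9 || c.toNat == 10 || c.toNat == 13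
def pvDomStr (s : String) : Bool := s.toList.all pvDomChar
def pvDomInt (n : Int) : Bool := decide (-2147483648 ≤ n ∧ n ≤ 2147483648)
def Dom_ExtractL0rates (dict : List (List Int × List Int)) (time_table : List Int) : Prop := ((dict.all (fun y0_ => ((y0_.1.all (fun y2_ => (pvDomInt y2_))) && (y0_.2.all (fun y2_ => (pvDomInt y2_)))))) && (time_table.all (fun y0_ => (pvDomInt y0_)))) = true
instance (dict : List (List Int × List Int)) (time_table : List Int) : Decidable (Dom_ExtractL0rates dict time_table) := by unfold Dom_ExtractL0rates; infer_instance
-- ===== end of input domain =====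

-- B buckets the dict entries by time in one pass, then looks the frame up per table_time,
-- instead of rescanning the whole dict for every table_time (objective: faster, asymptotic).

-- ===== PORT A =====
-- A iterates time_table, and for each table_time scans dict.items(), appending the
-- ccoor (value[1]) and rate (value[2]) of every entry whose key[0] equals table_time.
-- Indexing uses PySem.List.pyGet?; '.getD 0' is only reached where Python raises
-- IndexError (excluded by Pre_).
def ExtractL0rates (dict : List (List Int × List Int)) (time_table : List Int) : List (List Int) × List (List Int) :=
  let d := PySem.Dict.ofList dict
  time_table.foldl
    (fun (acc : List (List Int) × List (List Int)) table_time =>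
      let frame := d.items.foldl
        (fun (f : List Int × List Int) p =>
          let this_time := (PySem.List.pyGet? p.1 0).getD 0
          let _this_det := (PySem.List.pyGet? p.1 1).getD 0      -- unpacked but unused, as in A
          let _this_lv0 := (PySem.List.pyGet? p.2 0).getD 0      -- unpacked but unused, as in A
          let this_ccoor := (PySem.List.pyGet? p.2 1).getD 0
          let this_rate := (PySem.List.pyGet? p.2 2).getD 0
          if this_time == table_time then (f.1 ++ [this_ccoor], f.2 ++ [this_rate]) else f)
        ([], [])
      (acc.1 ++ [frame.1], acc.2 ++ [frame.2]))
    ([], [])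

-- ===== PORT B =====
-- Early return for an empty time_table (no frames requested, no index built); otherwise one
-- pass over dict.items() builds buckets : time ↦ (ccoors, rates), then one lookup per table_time.
def ExtractL0rates_alt (dict : List (List Int × List Int)) (time_table : List Int) : List (List Int) × List (List Int) :=
  match time_table with
  | [] => ([], [])
  | _ =>
    let d := PySem.Dict.ofList dict
    let buckets := d.items.foldl
      (fun (b : PySem.Dict Int (List Int × List Int)) p =>
        let t := (PySem.List.pyGet? p.1 0).getD 0
        let cur := b.getD t ([], [])
        b.insert t (cur.1 ++ [(PySem.List.pyGet? p.2 1).getD 0],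
                    cur.2 ++ [(PySem.List.pyGet? p.2 2).getD 0]))
      PySem.Dict.empty
    (time_table.map (fun t => (buckets.getD t ([], [])).1),
     time_table.map (fun t => (buckets.getD t ([], [])).2))

-- ===== PRECONDITION & SPEC =====
-- Pre_ excludes exactly the inputs on which A raises IndexError: whenever time_table is
-- nonempty, A unpacks every dict entry, so every key needs length ≥ 2 and every value
-- length ≥ 3; with an empty time_table A never touches the dict and Pre_ admits everything.
def Pre_ExtractL0rates (dict : List (List Int × List Int)) (time_table : List Int) : Prop :=
  time_table = [] ∨ ∀ p ∈ (PySem.Dict.ofList dict).items, 2 ≤ p.1.length ∧ 3 ≤ p.2.length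
instance (dict : List (List Int × List Int)) (time_table : List Int) : Decidable (Pre_ExtractL0rates dict time_table) := by unfold Pre_ExtractL0rates; infer_instance

def pvWitness_ExtractL0rates : (List (List Int × List Int)) × List Int :=
  ([([1, 2], [9, 8, 7]), ([1, 3], [6, 5, 4]), ([2, 2], [3, 2, 1])], [1, 2, 1, 5])

def Spec_ExtractL0rates (dict : List (List Int × List Int)) (time_table : List Int) (out : List (List Int) × List (List Int)) : Prop := out = ExtractL0rates_alt dict time_table
instance (dict : List (List Int × List Int)) (time_table : List Int) (out : List (List Int) × List (List Int)) : Decidable (Spec_ExtractL0rates dict time_table out) := by unfold Spec_ExtractL0rates; infer_instance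

-- ===== CLAIM (what is proved, stated in full; the proofs are below) =====
def Claim_equal_ExtractL0rates : Prop := ∀ (dict : List (List Int × List Int)) (time_table : List Int), Dom_ExtractL0rates dict time_table → Pre_ExtractL0rates dict time_table → Spec_ExtractL0rates dict time_table (ExtractL0rates dict time_table)

-- ===== LEMMAS AND PROOFS =====

-- abbreviations for the three fields both programs read from an entry
def pvTime (p : List Int × List Int) : Int := (PySem.List.pyGet? p.1 0).getD 0
def pvCcoor (p : List Int × List Int) : Int := (PySem.List.pyGet? p.2 1).getD 0
def pvRate (p : List Int × List Int) : Int := (PySem.List.pyGet? p.2 2).getD 0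

-- A's inner scan for one table_time
def pvInner (l : List (List Int × List Int)) (t : Int) (f : List Int × List Int) : List Int × List Int :=
  l.foldl (fun f p => if pvTime p == t then (f.1 ++ [pvCcoor p], f.2 ++ [pvRate p]) else f) f

-- B's bucket-building fold
def pvBuckets (l : List (List Int × List Int)) (b : PySem.Dict Int (List Int × List Int)) : PySem.Dict Int (List Int × List Int) :=
  l.foldl (fun b p =>
    let cur := b.getD (pvTime p) ([], [])
    b.insert (pvTime p) (cur.1 ++ [pvCcoor p], cur.2 ++ [pvRate p])) b

-- the bucket for t after the fold is exactly A's inner scan started from that bucket's prior value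
theorem pvBuckets_getD (l : List (List Int × List Int)) :
    ∀ (b : PySem.Dict Int (List Int × List Int)) (t : Int),
      (pvBuckets l b).getD t ([], []) = pvInner l t (b.getD t ([], [])) := by
  induction l with
  | nil => intro b t; rfl
  | cons p rest ih =>
    intro b t
    rw [show pvBuckets (p :: rest) b = pvBuckets rest
        (b.insert (pvTime p) ((b.getD (pvTime p) ([], [])).1 ++ [pvCcoor p],
                              (b.getD (pvTime p) ([], [])).2 ++ [pvRate p])) from rfl]
    rw [ih]
    rw [show pvInner (p :: rest) t (b.getD t ([], [])) = pvInner rest t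
        (if pvTime p == t
         then ((b.getD t ([], [])).1 ++ [pvCcoor p], (b.getD t ([], [])).2 ++ [pvRate p])
         else b.getD t ([], [])) from rfl]
    congr 1
    rw [PySem.Dict.getD_insert]
    by_cases h : t = pvTime p
    · simp [h]
    · have hne : (pvTime p == t) = false := by
        simp only [beq_eq_false_iff_ne]; exact fun hh => h hh.symm
      simp [h, hne]

-- the outer fold of A appends one frame per table_time
theorem pvOuter (tt : List Int) (F : Int → List Int × List Int) :
    ∀ (a : List (List Int) × List (List Int)),
      tt.foldl (fun acc t => (acc.1 ++ [(F t).1], acc.2 ++ [(F t).2])) a =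
        (a.1 ++ tt.map (fun t => (F t).1), a.2 ++ tt.map (fun t => (F t).2)) := by
  induction tt with
  | nil => intro a; simp
  | cons t rest ih => intro a; simp [ih]

-- A restated via the proof-side helpers (definitional)
theorem pvA_eq (dict : List (List Int × List Int)) (time_table : List Int) :
    ExtractL0rates dict time_table =
      time_table.foldl (fun acc t =>
        (acc.1 ++ [(pvInner (PySem.Dict.ofList dict).items t ([], [])).1],
         acc.2 ++ [(pvInner (PySem.Dict.ofList dict).items t ([], [])).2])) ([], []) := rfl

-- B on a nonempty time_table, restated via the proof-side helpers (definitional)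
theorem pvB_eq (dict : List (List Int × List Int)) (t0 : Int) (rest : List Int) :
    ExtractL0rates_alt dict (t0 :: rest) =
      ((t0 :: rest).map (fun t => ((pvBuckets (PySem.Dict.ofList dict).items PySem.Dict.empty).getD t ([], [])).1),
       (t0 :: rest).map (fun t => ((pvBuckets (PySem.Dict.ofList dict).items PySem.Dict.empty).getD t ([], [])).2)) := rfl

theorem ExtractL0rates_eq (dict : List (List Int × List Int)) (time_table : List Int) :
    ExtractL0rates dict time_table = ExtractL0rates_alt dict time_table := by
  cases time_table with
  | nil => rfl
  | cons t0 rest =>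
    rw [pvA_eq, pvB_eq,
        pvOuter (t0 :: rest) (fun t => pvInner (PySem.Dict.ofList dict).items t ([], [])) ([], [])]
    simp only [List.nil_append, pvBuckets_getD, PySem.Dict.getD_empty]

-- ===== VERDICT (by name: the statement is the Claim_ definition above) =====
theorem ExtractL0rates_spec : Claim_equal_ExtractL0rates := by
  intro dict time_table _ _
  unfold Spec_ExtractL0rates
  exact ExtractL0rates_eq dict time_table
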